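-- pv_equiv track=rewrite | github.com/maddevsio/ai-review-skill | Bitbucket/scripts/show-context.py | find_file_section
-- ===== SOURCE A (Python) =====
-- def find_file_section(lines: list[str], file_path: str) -> list[str]:
--     """
--     Extracts lines belonging to the given file's section from the annotated diff.
--     Matches against 'diff --git' headers and '+++ b/<path>' lines.
--     """
--     section_start = -1
--     section_end = len(lines)
--
--     # Try to match by full path first, then by basename
--     def matches(line: str) -> bool:
--         return file_path in line
--
--     for i, line in enumerate(lines):
--         if line.startswith("diff --git"):
--             if section_start >= 0:
--                 # We were already in a section; this is the next file — stop
--                 section_end = i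
--                 break
--             if matches(line):
--                 section_start = i
--         elif line.startswith("+++ b/") and section_start < 0:
--             # Fallback: match on +++ b/ header
--             if file_path in line or file_path.split("/")[-1] in line:
--                 # Walk back to find the diff --git line
--                 for j in range(i, -1, -1):
--                     if lines[j].startswith("diff --git"):
--                         section_start = j
--                         break
--
--     if section_start < 0:
--         return []
--
--     return lines[section_start:section_end]
-- ===== SOURCE B (Python) =====
-- def find_file_section(lines: list[str], file_path: str) -> list[str]:
--     """Scan the diff section by section: the first section whose header
--     contains file_path, or which holds a matching '+++ b/' line, is returned."""
--     base = file_path.split("/")[-1]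
--     n = len(lines)
--
--     def is_header(l):
--         return l.startswith("diff --git")
--
--     def section_matches(sec):
--         if file_path in sec[0]:
--             return True
--         return any(l.startswith("+++ b/") and (file_path in l or base in l)
--                    for l in sec)
--
--     i = 0
--     while i < n and not is_header(lines[i]):
--         i += 1
--     while i < n:
--         j = i + 1
--         while j < n and not is_header(lines[j]):
--             j += 1
--         sec = lines[i:j]
--         if section_matches(sec):
--             return sec
--         i = j
--     return []
-- ===== Notes on version B (the rewrite author's own statement) =====
-- stated objective: simpler
-- what changed: A's single stateful pass (section_start/section_end flags plus an inner walk-back loop to re-find the current header) is replaced by a direct section-at-a-time scan: skip to the first 'diff --git' header, split off each section up to the next header, and return the first section whose header contains the path or which holds a matching '+++ b/' line.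
import Mathlib
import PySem

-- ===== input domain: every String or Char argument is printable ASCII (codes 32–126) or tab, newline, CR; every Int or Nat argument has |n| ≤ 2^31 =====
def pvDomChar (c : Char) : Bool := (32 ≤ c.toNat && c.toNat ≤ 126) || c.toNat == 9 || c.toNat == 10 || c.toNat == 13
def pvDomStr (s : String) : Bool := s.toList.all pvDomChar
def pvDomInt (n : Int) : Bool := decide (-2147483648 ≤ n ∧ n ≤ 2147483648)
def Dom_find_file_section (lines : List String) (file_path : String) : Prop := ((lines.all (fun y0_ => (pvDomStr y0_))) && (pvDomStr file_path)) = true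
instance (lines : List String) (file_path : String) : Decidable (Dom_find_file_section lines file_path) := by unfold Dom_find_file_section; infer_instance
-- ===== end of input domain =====

-- B replaces A's stateful single pass with walk-back by a section-at-a-time scan (simpler decomposition, same cost).

-- ===== PORT A =====
-- shared literal tests, identical text in both Python sources:
-- line.startswith("diff --git")  and  file_path.split("/")[-1]
def ffsIsHeader (l : String) : Bool := PySem.Str.startswith l "diff --git"

-- split("/") with a non-empty separator never raises, and its result is non-empty,
-- so the .getD defaults below are never taken
def ffsBase (fp : String) : String :=
  PySem.List.pyGetD ((PySem.Str.split? fp "/").getD []) (-1) ""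

-- 'for j in range(i, -1, -1): if lines[j].startswith("diff --git"): section_start = j; break'
-- (lines[j] is always in range here: 0 ≤ j ≤ i < len(lines); -1 = loop fell through, start stays -1)
def ffsWalkback (lines : List String) : List Int → Int
  | [] => -1
  | j :: js => if ffsIsHeader (PySem.List.pyGetD lines j "") then j else ffsWalkback lines js

-- the 'for i, line in enumerate(lines)' loop; state = (section_start, section_end);
-- returning a pair models 'break' (second component = section_end, default len(lines))
def ffsLoopA (lines : List String) (fp : String) : List String → Int → Int → Int × Int
  | [], _i, start => (start, (lines.length : Int))
  | l :: rest, i, start =>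
    if ffsIsHeader l then
      if start ≥ 0 then (start, i)
      else if PySem.Str.isIn fp l then ffsLoopA lines fp rest (i + 1) i
      else ffsLoopA lines fp rest (i + 1) start
    else if PySem.Str.startswith l "+++ b/" && decide (start < 0) then
      if PySem.Str.isIn fp l || PySem.Str.isIn (ffsBase fp) l then
        ffsLoopA lines fp rest (i + 1) (ffsWalkback lines (PySem.List.pyRange i (-1) (-1)))
      else ffsLoopA lines fp rest (i + 1) start
    else ffsLoopA lines fp rest (i + 1) start

def find_file_section (lines : List String) (file_path : String) : List String :=
  let r := ffsLoopA lines file_path lines 0 (-1)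
  if r.1 < 0 then [] else PySem.List.slice lines (some r.1) (some r.2)

-- ===== PORT B =====
-- the any(...) lambda: l.startswith("+++ b/") and (file_path in l or base in l)
def ffsLineMatch (fp base l : String) : Bool :=
  PySem.Str.startswith l "+++ b/" && (PySem.Str.isIn fp l || PySem.Str.isIn base l)

-- section_matches(sec) with sec = hd :: body
def ffsSecMatch (fp base : String) (hd : String) (body : List String) : Bool :=
  PySem.Str.isIn fp hd || (hd :: body).any (fun l => ffsLineMatch fp base l)

-- the inner 'while j < n and not is_header(lines[j])' loop: body of the current section + remainder
def ffsSplitBody : List String → List String × List String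
  | [] => ([], [])
  | l :: r =>
    if ffsIsHeader l then ([], l :: r)
    else (l :: (ffsSplitBody r).1, (ffsSplitBody r).2)

-- initial 'while i < n and not is_header(lines[i])' skip loop
def ffsSkip : List String → List String
  | [] => []
  | l :: r => if ffsIsHeader l then l :: r else ffsSkip r

lemma ffsSplitBody_snd_length (r : List String) : (ffsSplitBody r).2.length ≤ r.length := by
  induction r with
  | nil => simp [ffsSplitBody]
  | cons l r ih =>
    simp only [ffsSplitBody]
    split <;> simp <;> omega

-- the outer 'while i < n' loop over sections
def ffsLoopB (fp base : String) : List String → List String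
  | [] => []
  | l :: r =>
    if ffsSecMatch fp base l (ffsSplitBody r).1 then l :: (ffsSplitBody r).1
    else ffsLoopB fp base (ffsSplitBody r).2
termination_by xs => xs.length
decreasing_by
  simp only [List.length_cons]
  exact Nat.lt_succ_of_le (ffsSplitBody_snd_length r)

def find_file_section_alt (lines : List String) (file_path : String) : List String :=
  ffsLoopB file_path (ffsBase file_path) (ffsSkip lines)

-- ===== PRECONDITION & SPEC =====
def Spec_find_file_section (lines : List String) (file_path : String) (out : List String) : Prop := out = find_file_section_alt lines file_path
instance (lines : List String) (file_path : String) (out : List String) : Decidable (Spec_find_file_section lines file_path out) := by unfold Spec_find_file_section; infer_instance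

-- ===== CLAIM (what is proved, stated in full; the proofs are below) =====
def Claim_equal_find_file_section : Prop := ∀ (lines : List String) (file_path : String), Dom_find_file_section lines file_path → Spec_find_file_section lines file_path (find_file_section lines file_path)

-- ===== LEMMAS AND PROOFS =====

-- basic facts about ffsSplitBody
lemma ffsSplitBody_eq (r : List String) : r = (ffsSplitBody r).1 ++ (ffsSplitBody r).2 := by
  induction r with
  | nil => simp [ffsSplitBody]
  | cons l r ih =>
    simp only [ffsSplitBody]
    split
    · simp
    · simpa using ih

lemma ffsSplitBody_fst_noH (r : List String) :
    ∀ l ∈ (ffsSplitBody r).1, ffsIsHeader l = false := by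
  induction r with
  | nil => simp [ffsSplitBody]
  | cons l r ih =>
    simp only [ffsSplitBody]
    split
    · simp
    · rename_i hl
      intro x hx
      rcases List.mem_cons.1 hx with rfl | hx
      · simpa using hl
      · exact ih x hx

lemma ffsSplitBody_snd_shape (r : List String) :
    (ffsSplitBody r).2 = [] ∨ ∃ h t, (ffsSplitBody r).2 = h :: t ∧ ffsIsHeader h = true := by
  induction r with
  | nil => simp [ffsSplitBody]
  | cons l r ih =>
    simp only [ffsSplitBody]
    split
    · rename_i hl
      exact Or.inr ⟨l, r, rfl, hl⟩
    · exact ih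

lemma ffsSplitBody_of_noH (b rem : List String)
    (hb : ∀ l ∈ b, ffsIsHeader l = false)
    (hr : rem = [] ∨ ∃ h t, rem = h :: t ∧ ffsIsHeader h = true) :
    ffsSplitBody (b ++ rem) = (b, rem) := by
  induction b with
  | nil =>
    rcases hr with rfl | ⟨h, t, rfl, hH⟩
    · simp [ffsSplitBody]
    · simp [ffsSplitBody, hH]
  | cons l b ih =>
    have hl : ffsIsHeader l = false := hb l (by simp)
    have ihb := ih (fun x hx => hb x (List.mem_cons_of_mem _ hx))
    simp [ffsSplitBody, hl, ihb]

-- a string cannot start with both "diff --git" and "+++ b/"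
lemma hdr_not_plus (l : String) (h : ffsIsHeader l = true) :
    PySem.Str.startswith l "+++ b/" = false := by
  by_contra hc
  have h2 : PySem.Str.startswith l "+++ b/" = true := by simpa using hc
  rw [ffsIsHeader] at h
  have hp1 := (PySem.Chars.startswith_iff _ _).1 (by simpa using h)
  have hp2 := (PySem.Chars.startswith_iff _ _).1 (by simpa using h2)
  rcases List.prefix_or_prefix_of_prefix hp1 hp2 with hq | hq
  · exact absurd hq (by decide)
  · exact absurd hq (by decide)

lemma hdr_not_lineMatch (fp base l : String) (h : ffsIsHeader l = true) :
    ffsLineMatch fp base l = false := by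
  simp only [ffsLineMatch, hdr_not_plus l h, Bool.false_and]

-- walk-back over range(j, -1, -1) finds no header
lemma walkback_none (lines : List String) : ∀ (j : Nat),
    (∀ k : Nat, k ≤ j → ffsIsHeader (lines.getD k "") = false) →
    ffsWalkback lines (PySem.List.pyRange (j : Int) (-1) (-1)) = -1 := by
  intro j
  induction j with
  | zero =>
    intro hk
    have hc : ¬(ffsIsHeader (PySem.List.pyGetD lines ((0 : Nat) : Int) "") = true) := by
      simp only [Nat.cast_zero, PySem.List.pyGetD_zero, hk 0 (le_refl _)]
      decide
    rw [show ((0 : Nat) : Int) = 0 by norm_num] at hc ⊢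
    rw [PySem.List.pyRange_neg_one_cons (by norm_num)]
    simp only [ffsWalkback]
    rw [if_neg hc, show ((0 : Int) - 1) = -1 by norm_num,
      PySem.List.pyRange_neg_one_eq_nil (le_refl _)]
    rfl
  | succ j ih =>
    intro hk
    have hc : ¬(ffsIsHeader (PySem.List.pyGetD lines ((j + 1 : Nat) : Int) "") = true) := by
      rw [PySem.List.pyGetD_natCast, hk (j + 1) (le_refl _)]
      decide
    rw [PySem.List.pyRange_neg_one_cons (by push_cast; omega)]
    simp only [ffsWalkback]
    rw [if_neg hc, show (((j + 1 : Nat) : Int) - 1) = ((j : Nat) : Int) by push_cast; ring]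
    exact ih (fun k hkk => hk k (Nat.le_succ_of_le hkk))

-- walk-back finds the nearest header at or below
lemma walkback_find (lines : List String) (i0 : Nat) : ∀ (j : Nat), i0 ≤ j →
    ffsIsHeader (lines.getD i0 "") = true →
    (∀ k : Nat, i0 < k → k ≤ j → ffsIsHeader (lines.getD k "") = false) →
    ffsWalkback lines (PySem.List.pyRange (j : Int) (-1) (-1)) = (i0 : Int) := by
  intro j
  induction j with
  | zero =>
    intro hij h0 _
    have hi0 : i0 = 0 := Nat.le_zero.1 hij
    subst hi0
    have hc : ffsIsHeader (PySem.List.pyGetD lines ((0 : Nat) : Int) "") = true := by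
      simpa only [Nat.cast_zero, PySem.List.pyGetD_zero] using h0
    rw [show ((0 : Nat) : Int) = 0 by norm_num] at hc ⊢
    rw [PySem.List.pyRange_neg_one_cons (by norm_num)]
    simp only [ffsWalkback]
    rw [if_pos hc]
  | succ j ih =>
    intro hij h0 hk
    rw [PySem.List.pyRange_neg_one_cons (by push_cast; omega)]
    simp only [ffsWalkback]
    by_cases hc : i0 = j + 1
    · subst hc
      rw [if_pos (by rw [PySem.List.pyGetD_natCast]; exact h0)]
    · have hij' : i0 ≤ j := by omega
      have hcc : ¬(ffsIsHeader (PySem.List.pyGetD lines ((j + 1 : Nat) : Int) "") = true) := by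
        rw [PySem.List.pyGetD_natCast, hk (j + 1) (by omega) (le_refl _)]
        decide
      rw [if_neg hcc, show (((j + 1 : Nat) : Int) - 1) = ((j : Nat) : Int) by push_cast; ring]
      exact ih hij' h0 (fun k h1 h2 => hk k h1 (Nat.le_succ_of_le h2))

-- once section_start ≥ 0, the loop only looks for the next header
lemma phase2 (lines : List String) (fp : String) : ∀ (rest : List String) (i s : Int), 0 ≤ s →
    ffsLoopA lines fp rest i s =
      (s, if (ffsSplitBody rest).2 = [] then (lines.length : Int)
          else i + ((ffsSplitBody rest).1.length : Int)) := by
  intro rest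
  induction rest with
  | nil => intro i s hs; simp [ffsLoopA, ffsSplitBody]
  | cons l r ih =>
    intro i s hs
    by_cases hH : ffsIsHeader l = true
    · simp only [ffsLoopA, hH, if_true]
      rw [if_pos (by omega : s ≥ 0)]
      simp [ffsSplitBody, hH]
    · have hs' : decide (s < 0) = false := by simp; omega
      simp only [ffsLoopA, hH, Bool.false_eq_true, if_false, hs', Bool.and_false]
      rw [ih (i + 1) s hs]
      simp only [ffsSplitBody, hH, Bool.false_eq_true, if_false]
      by_cases hrem : (ffsSplitBody r).2 = []
      · simp [hrem]
      · rw [if_neg hrem, if_neg hrem, Prod.mk.injEq]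
        refine ⟨rfl, ?_⟩
        simp only [List.length_cons]
        push_cast
        ring

lemma getD_append_cons (pre z : List String) (h : String) :
    (pre ++ h :: z).getD pre.length "" = h := by
  rw [List.getD_append_right pre (h :: z) "" pre.length (le_refl _)]
  simp

-- phase 1 inside a section whose header did not match:
-- scanning the body either hits a matching '+++ b/' line (walk-back then returns the
-- index of the section header) or reaches the remainder with section_start still -1
lemma phase1 (fp : String) (pre : List String) (h : String) (hH : ffsIsHeader h = true) :
    ∀ (body done rem : List String) (J : Int),
    J = (pre.length : Int) + 1 + (done.length : Int) →
    (∀ l ∈ body, ffsIsHeader l = false) →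
    (∀ l ∈ done, ffsIsHeader l = false) →
    (rem = [] ∨ ∃ r0 r', rem = r0 :: r' ∧ ffsIsHeader r0 = true) →
    ffsLoopA (pre ++ h :: (done ++ body ++ rem)) fp (body ++ rem) J (-1) =
      (if body.any (fun l => ffsLineMatch fp (ffsBase fp) l) then
        ((pre.length : Int),
         if rem = [] then (((pre ++ h :: (done ++ body ++ rem)).length : Nat) : Int)
         else J + (body.length : Int))
      else
        ffsLoopA (pre ++ h :: (done ++ body ++ rem)) fp rem
          (J + (body.length : Int)) (-1)) := by
  intro body
  induction body with
  | nil =>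
    intro done rem _ _ _ _
    simp
  | cons l b ih =>
    intro done rem J hJ hbody hdone hrem
    have hl : ffsIsHeader l = false := hbody l (by simp)
    have hb' : ∀ x ∈ b, ffsIsHeader x = false := fun x hx => hbody x (List.mem_cons_of_mem _ hx)
    -- lines[k] for pre.length < k ≤ pre.length + 1 + done.length is in done ++ [l]
    have hgdk : ∀ k : Nat, pre.length < k → k ≤ pre.length + 1 + done.length →
        ffsIsHeader ((pre ++ h :: (done ++ (l :: b) ++ rem)).getD k "") = false := by
      intro k h1 h2
      rw [List.getD_append_right pre _ "" k (by omega)]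
      rw [show k - pre.length = (k - pre.length - 1) + 1 by omega, List.getD_cons_succ]
      rw [List.getD_append (done ++ l :: b) rem "" _ (by simp; omega)]
      rcases Nat.lt_or_ge (k - pre.length - 1) done.length with hlt | hge
      · rw [List.getD_append done (l :: b) "" _ hlt, List.getD_eq_getElem _ _ hlt]
        exact hdone _ (List.getElem_mem _)
      · have hkeq : k - pre.length - 1 = done.length := by omega
        rw [hkeq, List.getD_append_right done (l :: b) "" _ (le_refl _)]
        simpa using hl
    by_cases hm : ffsLineMatch fp (ffsBase fp) l = true
    · -- the '+++ b/' line matches: walk back, then phase 2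
      have hparts : PySem.Str.startswith l "+++ b/" = true ∧
          (PySem.Str.isIn fp l || PySem.Str.isIn (ffsBase fp) l) = true := by
        simpa only [ffsLineMatch, Bool.and_eq_true] using hm
      obtain ⟨hsw, hmm⟩ := hparts
      have hwb : ffsWalkback (pre ++ h :: (done ++ (l :: b) ++ rem))
          (PySem.List.pyRange J (-1) (-1)) = ((pre.length : Nat) : Int) := by
        rw [show J = ((pre.length + 1 + done.length : Nat) : Int) by push_cast; omega]
        refine walkback_find _ pre.length _ (by omega) ?_ ?_
        · rw [getD_append_cons]; exact hH
        · exact hgdk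
      simp only [List.cons_append, ffsLoopA]
      rw [if_neg (by rw [hl]; decide), if_pos (by rw [hsw]; decide), if_pos hmm]
      rw [hwb]
      rw [phase2 _ _ _ _ _ (Int.natCast_nonneg _)]
      rw [ffsSplitBody_of_noH b rem hb' hrem]
      have hany : ((l :: b).any (fun x => ffsLineMatch fp (ffsBase fp) x)) = true := by
        simp [List.any_cons, hm]
      rw [if_pos hany]
      by_cases hr0 : rem = []
      · simp [hr0]
      · rw [if_neg hr0, if_neg hr0, Prod.mk.injEq]
        refine ⟨rfl, ?_⟩
        simp only [List.length_cons]
        push_cast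
        ring
    · -- no match on this line: the loop just moves on
      have hm' : ffsLineMatch fp (ffsBase fp) l = false := by simpa using hm
      have hcont : ffsLoopA (pre ++ h :: (done ++ (l :: b) ++ rem)) fp (l :: (b ++ rem)) J (-1) =
          ffsLoopA (pre ++ h :: (done ++ (l :: b) ++ rem)) fp (b ++ rem) (J + 1) (-1) := by
        simp only [ffsLoopA]
        rw [if_neg (by rw [hl]; decide)]
        cases hsw : PySem.Str.startswith l "+++ b/" with
        | true =>
          have hmm : (PySem.Str.isIn fp l || PySem.Str.isIn (ffsBase fp) l) = false := by
            have h5 := hm'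
            simp only [ffsLineMatch, hsw, Bool.true_and] at h5
            exact h5
          rw [if_pos (by decide), if_neg (by rw [hmm]; decide)]
        | false =>
          rw [if_neg (by decide)]
      have key := ih (done ++ [l]) rem (J + 1)
        (by simp only [List.length_append, List.length_cons, List.length_nil]; push_cast; omega)
        hb'
        (by
          intro x hx
          rcases List.mem_append.1 hx with hx | hx
          · exact hdone x hx
          · rw [List.mem_singleton.1 hx]; exact hl)
        hrem
      simp only [List.cons_append] at hcont ⊢
      rw [hcont]
      simp only [List.append_assoc, List.singleton_append, List.cons_append, List.nil_append,
        List.any_cons, hm', Bool.false_or, List.length_cons, List.length_append,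
        List.length_nil, Nat.cast_add, Nat.cast_one] at key ⊢
      rw [show J + ((b.length : Int) + 1) = J + 1 + (b.length : Int) by ring]
      exact key

-- scanning a header-free prefix from section_start = -1 changes nothing
lemma phase0 (fp : String) : ∀ (pre done rest : List String),
    (∀ l ∈ done ++ pre, ffsIsHeader l = false) →
    ffsLoopA (done ++ pre ++ rest) fp (pre ++ rest) ((done.length : Nat) : Int) (-1) =
      ffsLoopA (done ++ pre ++ rest) fp rest
        (((done.length : Nat) : Int) + ((pre.length : Nat) : Int)) (-1) := by
  intro pre
  induction pre with
  | nil => intro done rest _; simp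
  | cons l p ih =>
    intro done rest hno
    have hl : ffsIsHeader l = false := hno l (by simp)
    have hdone : ∀ x ∈ done, ffsIsHeader x = false := fun x hx => hno x (List.mem_append_left _ hx)
    have hwb : ffsWalkback (done ++ (l :: p) ++ rest)
        (PySem.List.pyRange ((done.length : Nat) : Int) (-1) (-1)) = -1 := by
      refine walkback_none _ done.length ?_
      intro k hk
      rw [show done ++ (l :: p) ++ rest = done ++ (l :: (p ++ rest)) by simp]
      rcases Nat.lt_or_ge k done.length with hlt | hge
      · rw [List.getD_append done _ "" _ hlt, List.getD_eq_getElem _ _ hlt]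
        exact hdone _ (List.getElem_mem _)
      · have : k = done.length := by omega
        rw [this, getD_append_cons]
        exact hl
    have hcont : ffsLoopA (done ++ (l :: p) ++ rest) fp (l :: (p ++ rest))
          ((done.length : Nat) : Int) (-1) =
        ffsLoopA (done ++ (l :: p) ++ rest) fp (p ++ rest)
          (((done.length : Nat) : Int) + 1) (-1) := by
      simp only [ffsLoopA]
      rw [if_neg (by rw [hl]; decide)]
      cases hsw : PySem.Str.startswith l "+++ b/" with
      | true =>
        cases hmm : (PySem.Str.isIn fp l || PySem.Str.isIn (ffsBase fp) l) with
        | true => rw [if_pos (by decide), if_pos rfl, hwb]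
        | false => rw [if_pos (by decide), if_neg (by decide)]
      | false =>
        rw [if_neg (by decide)]
    have key := ih (done ++ [l]) rest
      (by
        intro x hx
        rcases List.mem_append.1 hx with hx | hx
        · rcases List.mem_append.1 hx with hx | hx
          · exact hdone x hx
          · rw [List.mem_singleton.1 hx]; exact hl
        · exact hno x (List.mem_append_right _ (List.mem_cons_of_mem _ hx)))
    simp only [List.cons_append] at hcont ⊢
    rw [hcont]
    simp only [List.append_assoc, List.singleton_append, List.cons_append, List.nil_append,
      List.length_append, List.length_cons, List.length_nil, Nat.cast_add, Nat.cast_one] at key ⊢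
    rw [show ((done.length : Int)) + ((p.length : Int) + 1) = (done.length : Int) + 1 + (p.length : Int) by ring]
    exact key

lemma ffsSkip_decomp : ∀ lines : List String,
    ∃ pre, lines = pre ++ ffsSkip lines ∧ ∀ l ∈ pre, ffsIsHeader l = false := by
  intro lines
  induction lines with
  | nil => exact ⟨[], by simp [ffsSkip]⟩
  | cons l r ih =>
    by_cases h : ffsIsHeader l = true
    · exact ⟨[], by simp [ffsSkip, h]⟩
    · obtain ⟨p, hp1, hp2⟩ := ih
      refine ⟨l :: p, ?_, ?_⟩
      · simp only [ffsSkip, h, Bool.false_eq_true, if_false]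
        simp [← hp1]
      · intro x hx
        rcases List.mem_cons.1 hx with rfl | hx
        · simpa using h
        · exact hp2 x hx

lemma ffsSkip_shape : ∀ lines : List String,
    ffsSkip lines = [] ∨ ∃ h t, ffsSkip lines = h :: t ∧ ffsIsHeader h = true := by
  intro lines
  induction lines with
  | nil => simp [ffsSkip]
  | cons l r ih =>
    by_cases h : ffsIsHeader l = true
    · exact Or.inr ⟨l, r, by simp [ffsSkip, h], h⟩
    · simpa [ffsSkip, h] using ih

-- slicing out a whole trailing section / a section up to the next header
lemma slice_whole (pre z : List String) (h : String) :
    PySem.List.slice (pre ++ h :: z) (some ((pre.length : Nat) : Int))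
      (some (((pre ++ h :: z).length : Nat) : Int)) = h :: z := by
  rw [PySem.List.slice_natCast, List.drop_left]
  apply List.take_of_length_le
  simp

lemma slice_section (pre body rem : List String) (h : String) :
    PySem.List.slice (pre ++ h :: (body ++ rem)) (some ((pre.length : Nat) : Int))
      (some (((pre.length : Nat) : Int) + 1 + ((body.length : Nat) : Int))) = h :: body := by
  rw [show ((pre.length : Nat) : Int) + 1 + ((body.length : Nat) : Int)
      = ((pre.length + 1 + body.length : Nat) : Int) by push_cast; ring]
  rw [PySem.List.slice_natCast, List.drop_left]
  rw [show pre.length + 1 + body.length - pre.length = body.length + 1 by omega]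
  simp only [List.take_succ_cons]
  rw [List.take_left]

lemma ffsOut_of_nonneg (lines : List String) (a b : Int) (ha : 0 ≤ a) :
    (if ((a, b) : Int × Int).1 < 0 then ([] : List String)
     else PySem.List.slice lines (some ((a, b) : Int × Int).1) (some ((a, b) : Int × Int).2))
      = PySem.List.slice lines (some a) (some b) := by
  have h1 : ¬(((a, b) : Int × Int).1 < 0) := by simpa using (by omega : ¬(a < 0))
  rw [if_neg h1]

-- the main induction: A on a section-aligned remainder equals B's section scan
lemma mainLemma (fp : String) : ∀ (n : Nat) (rest pre : List String), rest.length ≤ n →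
    (rest = [] ∨ ∃ h t, rest = h :: t ∧ ffsIsHeader h = true) →
    (if (ffsLoopA (pre ++ rest) fp rest ((pre.length : Nat) : Int) (-1)).1 < 0 then []
     else PySem.List.slice (pre ++ rest)
            (some (ffsLoopA (pre ++ rest) fp rest ((pre.length : Nat) : Int) (-1)).1)
            (some (ffsLoopA (pre ++ rest) fp rest ((pre.length : Nat) : Int) (-1)).2))
      = ffsLoopB fp (ffsBase fp) rest := by
  intro n
  induction n with
  | zero =>
    intro rest pre h1 _h2
    have : rest = [] := List.length_eq_zero_iff.1 (Nat.le_zero.1 h1)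
    subst this
    simp [ffsLoopA, ffsLoopB]
  | succ n ih =>
    intro rest pre hlen hshape
    rcases hshape with rfl | ⟨h, t, rfl, hshH⟩
    · simp [ffsLoopA, ffsLoopB]
    · have hsb := ffsSplitBody_eq t
      have hno := ffsSplitBody_fst_noH t
      have hsh := ffsSplitBody_snd_shape t
      rcases hbr : ffsSplitBody t with ⟨body, rem⟩
      rw [hbr] at hsb hno hsh
      simp only at hsb hno hsh
      have hBstep : ffsLoopB fp (ffsBase fp) (h :: t) =
          if ffsSecMatch fp (ffsBase fp) h body then h :: body
          else ffsLoopB fp (ffsBase fp) rem := by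
        rw [ffsLoopB, hbr]
      have hAstep :
          ffsLoopA (pre ++ h :: t) fp (h :: t) ((pre.length : Nat) : Int) (-1) =
            (if PySem.Str.isIn fp h then
              ffsLoopA (pre ++ h :: t) fp t (((pre.length : Nat) : Int) + 1) ((pre.length : Nat) : Int)
            else
              ffsLoopA (pre ++ h :: t) fp t (((pre.length : Nat) : Int) + 1) (-1)) := by
        simp only [ffsLoopA]
        rw [if_pos hshH, if_neg (by omega : ¬((-1 : Int) ≥ 0))]
      rw [hAstep, hBstep]
      cases hfp : PySem.Str.isIn fp h with
      | true =>
        -- header itself matches the path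
        have hsm : ffsSecMatch fp (ffsBase fp) h body = true := by
          unfold ffsSecMatch
          rw [hfp]
          rfl
        rw [if_pos rfl, if_pos hsm]
        rw [hsb, phase2 _ _ _ _ _ (Int.natCast_nonneg _),
          ffsSplitBody_of_noH body rem hno hsh]
        rw [ffsOut_of_nonneg _ _ _ (Int.natCast_nonneg _)]
        by_cases hr0 : rem = []
        · subst hr0
          rw [if_pos rfl]
          simpa using slice_whole pre body h
        · rw [if_neg hr0]
          exact slice_section pre body rem h
      | false =>
        -- header does not match: scan the body for '+++ b/' lines
        rw [if_neg (show ¬(false = true) by decide)]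
        have hph1 := phase1 fp pre h hshH body [] rem (((pre.length : Nat) : Int) + 1)
          (by simp) hno (by simp) hsh
        simp only [List.nil_append] at hph1
        rw [hsb, hph1]
        have hhm : ffsLineMatch fp (ffsBase fp) h = false := hdr_not_lineMatch _ _ _ hshH
        cases hany : (body.any (fun l => ffsLineMatch fp (ffsBase fp) l)) with
        | true =>
          have hsm : ffsSecMatch fp (ffsBase fp) h body = true := by
            unfold ffsSecMatch
            rw [hfp, List.any_cons, hhm, hany]
            rfl
          rw [if_pos rfl, if_pos hsm]
          rw [ffsOut_of_nonneg _ _ _ (Int.natCast_nonneg _)]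
          by_cases hr0 : rem = []
          · subst hr0
            rw [if_pos rfl]
            simpa using slice_whole pre body h
          · rw [if_neg hr0]
            exact slice_section pre body rem h
        | false =>
          have hsm : ffsSecMatch fp (ffsBase fp) h body = false := by
            unfold ffsSecMatch
            rw [hfp, List.any_cons, hhm, hany]
            rfl
          rw [if_neg (show ¬(false = true) by decide),
            if_neg (show ¬(ffsSecMatch fp (ffsBase fp) h body = true) by rw [hsm]; decide)]
          have hlen' : rem.length ≤ n := by
            have h1 : t.length = body.length + rem.length := by
              rw [hsb]; simp
            simp only [List.length_cons] at hlen
            omega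
          have key := ih rem (pre ++ h :: body) hlen' hsh
          simp only [List.append_assoc, List.cons_append, List.length_append,
            List.length_cons, Nat.cast_add, Nat.cast_one] at key ⊢
          rw [show ((pre.length : Int)) + 1 + ((body.length : Int))
              = (pre.length : Int) + ((body.length : Int) + 1) by ring]
          exact key

-- ===== VERDICT (by name: the statement is the Claim_ definition above) =====
theorem find_file_section_spec : Claim_equal_find_file_section := by
  intro lines fp _hdom
  unfold Spec_find_file_section
  unfold find_file_section find_file_section_alt
  obtain ⟨pre, hdec, hnoH⟩ := ffsSkip_decomp lines
  have hsh := ffsSkip_shape lines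
  set sk := ffsSkip lines with hsk
  have h0 := phase0 fp pre [] sk (by simpa using hnoH)
  simp only [List.nil_append, List.length_nil, Nat.cast_zero, zero_add] at h0
  rw [hdec, h0]
  exact mainLemma fp sk.length sk pre (le_refl _) hsh
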